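-- pv_equiv track=rewrite | github.com/Night-E-ye/Adv.OMR-Detection-System | app.py | calculate_subject_scores
-- ===== SOURCE A (Python) =====
-- SUBJECTS = {
--     1: "Data Analytics",
--     2: "Machine Learning",
--     3: "Statistics",
--     4: "Python Programming",
--     5: "SQL & Databases"
-- }
--
-- QUESTIONS_PER_SUBJECT = 20
--
-- def calculate_subject_scores(detected_answers, correct_answers):
--     """Calculate subject-wise scores (20 questions per subject)"""
--     subject_scores = {}
--     total_score = 0
--
--     for subject_num in range(1, 6):  # 5 subjects
--         start_q = (subject_num - 1) * QUESTIONS_PER_SUBJECT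
--         end_q = start_q + QUESTIONS_PER_SUBJECT
--
--         subject_correct = 0
--         for q_num in range(start_q, end_q):
--             q_key = str(q_num + 1)  # Questions numbered from 1
--             if q_key in detected_answers and q_key in correct_answers:
--                 if detected_answers[q_key] == correct_answers[q_key]:
--                     subject_correct += 1
--
--         subject_scores[SUBJECTS[subject_num]] = subject_correct
--         total_score += subject_correct
--
--     return subject_scores, total_score
-- ===== SOURCE B (Python) =====
-- SUBJECTS = {
--     1: "Data Analytics",
--     2: "Machine Learning",
--     3: "Statistics",
--     4: "Python Programming",
--     5: "SQL & Databases"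
-- }
--
-- QUESTIONS_PER_SUBJECT = 20
--
-- def calculate_subject_scores(detected_answers, correct_answers):
--     """Invert the iteration: instead of enumerating all 100 question numbers,
--     scan the answer-key entries once, classifying each key through a
--     precomputed key -> subject-index table, and tally into a bucket counter."""
--     names = [SUBJECTS[i] for i in range(1, 6)]
--     subject_of = {str(q): (q - 1) // QUESTIONS_PER_SUBJECT for q in range(1, 101)}
--     counts = {i: 0 for i in range(5)}
--     for k, v in correct_answers.items():
--         i = subject_of.get(k)
--         if i is not None and detected_answers.get(k) == v:
--             counts[i] += 1
--     return {names[i]: counts[i] for i in range(5)}, sum(counts.values())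
-- ===== Notes on version B (the rewrite author's own statement) =====
-- stated objective: alternative
-- what changed: Inverts the iteration: instead of enumerating all 100 question numbers and probing both dicts for each, B scans the answer-key entries once, classifies each key through a precomputed key->subject-index table, tallies matches into a bucket counter, and assembles the subject dict from the buckets at the end.
import Mathlib
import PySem

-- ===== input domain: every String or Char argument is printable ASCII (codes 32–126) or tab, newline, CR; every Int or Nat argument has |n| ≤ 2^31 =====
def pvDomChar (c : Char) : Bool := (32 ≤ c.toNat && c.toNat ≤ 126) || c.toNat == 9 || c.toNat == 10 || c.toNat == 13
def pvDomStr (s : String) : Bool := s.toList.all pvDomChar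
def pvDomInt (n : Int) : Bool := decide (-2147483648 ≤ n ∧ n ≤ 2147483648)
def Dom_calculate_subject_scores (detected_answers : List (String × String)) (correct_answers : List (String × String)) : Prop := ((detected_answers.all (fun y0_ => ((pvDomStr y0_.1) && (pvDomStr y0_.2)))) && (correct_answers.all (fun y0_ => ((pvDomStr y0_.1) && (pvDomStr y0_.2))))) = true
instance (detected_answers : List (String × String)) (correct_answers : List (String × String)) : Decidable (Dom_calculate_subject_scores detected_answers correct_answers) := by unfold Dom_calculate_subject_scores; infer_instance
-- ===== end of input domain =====

-- B inverts the iteration: it scans the answer-key dict entries once, classifying each key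
-- through a precomputed key->subject-index table into bucket counters, instead of A's nested
-- subject/question loops over all 100 question numbers (alternative algorithm, not claimed faster).
set_option maxRecDepth 32768


-- ===== PORT A =====
-- the module constant SUBJECTS (a dict keyed by int)
def pvSUBJECTS : PySem.Dict Int String :=
  PySem.Dict.ofList [(1, "Data Analytics"), (2, "Machine Learning"), (3, "Statistics"),
                     (4, "Python Programming"), (5, "SQL & Databases")]

def calculate_subject_scores (detected_answers : List (String × String)) (correct_answers : List (String × String)) : (List (String × Int)) × Int :=
  let detected := PySem.Dict.ofList detected_answers
  let correct := PySem.Dict.ofList correct_answers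
  let r :=
    (PySem.List.pyRange 1 6 1).foldl (fun (st : PySem.Dict String Int × Int) subject_num =>
      let start_q := (subject_num - 1) * 20
      let end_q := start_q + 20
      let subject_correct : Int :=
        (PySem.List.pyRange start_q end_q 1).foldl (fun acc q_num =>
          let q_key := PySem.Int.toStr (q_num + 1)
          match PySem.Dict.get? detected q_key, PySem.Dict.get? correct q_key with
          | some dv, some cv => if dv == cv then acc + 1 else acc
          | _, _ => acc) 0
      (st.1.insert ((pvSUBJECTS.get? subject_num).getD "") subject_correct,
       st.2 + subject_correct))
      (PySem.Dict.ofList [], 0)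
  (r.1.items, r.2)

-- ===== PORT B =====
-- the precomputed key -> subject-index table of Source B
def pvSubjectOf : PySem.Dict String Int :=
  PySem.Dict.ofList ((PySem.List.pyRange 1 101 1).map (fun q => (PySem.Int.toStr q, PySem.Int.floordiv (q - 1) 20)))

-- the body of Source B's scan loop
def pvStep (detected : PySem.Dict String String) :
    PySem.Dict Int Int → (String × String) → PySem.Dict Int Int := fun counts kv =>
  match pvSubjectOf.get? kv.1 with
  | some i => if detected.get? kv.1 == some kv.2 then counts.modify i 0 (· + 1) else counts
  | none => counts

def calculate_subject_scores_alt (detected_answers : List (String × String)) (correct_answers : List (String × String)) : (List (String × Int)) × Int :=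
  let detected := PySem.Dict.ofList detected_answers
  let correct := PySem.Dict.ofList correct_answers
  let names := (PySem.List.pyRange 1 6 1).map (fun i => (pvSUBJECTS.get? i).getD "")
  let counts0 : PySem.Dict Int Int := PySem.Dict.ofList ((PySem.List.pyRange 0 5 1).map (fun i => (i, (0 : Int))))
  let counts := correct.items.foldl (pvStep detected) counts0
  let scores :=
    (PySem.List.pyRange 0 5 1).foldl (fun (d : PySem.Dict String Int) i =>
      d.insert (PySem.List.pyGetD names i "") (counts.getD i 0)) (PySem.Dict.ofList [])
  (scores.items, counts.values.sum)

-- ===== PRECONDITION & SPEC =====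
def Spec_calculate_subject_scores (detected_answers : List (String × String)) (correct_answers : List (String × String)) (out : (List (String × Int)) × Int) : Prop := out = calculate_subject_scores_alt detected_answers correct_answers
instance (detected_answers : List (String × String)) (correct_answers : List (String × String)) (out : (List (String × Int)) × Int) : Decidable (Spec_calculate_subject_scores detected_answers correct_answers out) := by unfold Spec_calculate_subject_scores; infer_instance

-- ===== CLAIM (what is proved, stated in full; the proofs are below) =====
def Claim_equal_calculate_subject_scores : Prop := ∀ (detected_answers : List (String × String)) (correct_answers : List (String × String)), Dom_calculate_subject_scores detected_answers correct_answers → Spec_calculate_subject_scores detected_answers correct_answers (calculate_subject_scores detected_answers correct_answers)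

-- ===== LEMMAS AND PROOFS =====

-- per-question match indicator (the value of A's inner-loop step at one question)
def pvInc (da ca : List (String × String)) (q : Int) : Int :=
  match (PySem.Dict.ofList da).get? (PySem.Int.toStr q), (PySem.Dict.ofList ca).get? (PySem.Int.toStr q) with
  | some dv, some cv => if dv == cv then 1 else 0
  | _, _ => 0

-- sum of match indicators over questions a..b-1
def pvS (da ca : List (String × String)) (a b : Int) : Int :=
  ((PySem.List.pyRange a b 1).map (pvInc da ca)).sum

-- the five-entry subject dict with given values (common final shape of both sides)
def pvMk (v1 v2 v3 v4 v5 : Int) : PySem.Dict String Int :=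
  PySem.Dict.mk [("Data Analytics", v1), ("Machine Learning", v2), ("Statistics", v3),
                 ("Python Programming", v4), ("SQL & Databases", v5)]

-- A's inner loop over range(start, end) counts matches of questions start+1..end
theorem pv_innerA (da ca : List (String × String)) (a b : Int) :
    (PySem.List.pyRange a b 1).foldl (fun acc q_num =>
      match PySem.Dict.get? (PySem.Dict.ofList da) (PySem.Int.toStr (q_num + 1)),
            PySem.Dict.get? (PySem.Dict.ofList ca) (PySem.Int.toStr (q_num + 1)) with
      | some dv, some cv => if dv == cv then acc + 1 else acc
      | _, _ => acc) 0 = pvS da ca (a + 1) (b + 1) := by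
  have hstep : (fun (acc : Int) (q_num : Int) =>
      match PySem.Dict.get? (PySem.Dict.ofList da) (PySem.Int.toStr (q_num + 1)),
            PySem.Dict.get? (PySem.Dict.ofList ca) (PySem.Int.toStr (q_num + 1)) with
      | some dv, some cv => if dv == cv then acc + 1 else acc
      | _, _ => acc) = fun (acc : Int) (q : Int) => acc + pvInc da ca (q + 1) := by
    funext acc q
    rcases h1 : PySem.Dict.get? (PySem.Dict.ofList da) (PySem.Int.toStr (q + 1)) with _ | dv <;>
      rcases h2 : PySem.Dict.get? (PySem.Dict.ofList ca) (PySem.Int.toStr (q + 1)) with _ | cv <;>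
      simp [pvInc, h1, h2]
    all_goals try split_ifs
    all_goals simp_all
  rw [hstep, PySem.List.foldl_add]
  simp only [pvS, PySem.List.pyRange_one, List.map_map, zero_add]
  have hlen : (b - a).toNat = (b + 1 - (a + 1)).toNat := by omega
  rw [hlen]
  apply congrArg
  apply List.map_congr_left
  intro k _
  simp only [Function.comp]
  ring_nf

-- countP of a disjunction of disjoint predicates
theorem pv_countP_or {α : Type} (L : List α) (p r : α → Bool)
    (h : ∀ x ∈ L, ¬(p x = true ∧ r x = true)) :
    L.countP (fun x => p x || r x) = L.countP p + L.countP r := by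
  induction L with
  | nil => simp
  | cons x L ih =>
    have hx := h x List.mem_cons_self
    have ih' := ih (fun y hy => h y (List.mem_cons_of_mem _ hy))
    simp only [List.countP_cons]
    rw [ih']
    by_cases hp : p x = true
    · have hr : r x = false := by
        cases hhr : r x
        · rfl
        · exact absurd ⟨hp, hhr⟩ hx
      simp only [hp, hr, Bool.true_or]
      simp
      omega
    · rw [Bool.not_eq_true] at hp
      simp only [hp, Bool.false_or]
      simp
      omega

-- splitting a bucket count over the questions of its block
theorem pv_countP_split (m : (String × String) → Bool) (L : List (String × String)) (R : List Int)
    (hnd : (R.map PySem.Int.toStr).Nodup) :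
    L.countP (fun kv => decide (kv.1 ∈ R.map PySem.Int.toStr) && m kv)
      = (R.map (fun q => L.countP (fun kv => (kv.1 == PySem.Int.toStr q) && m kv))).sum := by
  induction R with
  | nil => simp
  | cons q R ih =>
    simp only [List.map_cons] at hnd ⊢
    have hq : PySem.Int.toStr q ∉ R.map PySem.Int.toStr := (List.nodup_cons.mp hnd).1
    have hnd' := (List.nodup_cons.mp hnd).2
    have hfun : (fun (kv : String × String) => decide (kv.1 ∈ PySem.Int.toStr q :: R.map PySem.Int.toStr) && m kv)
        = (fun kv => (((kv.1 == PySem.Int.toStr q) && m kv) || (decide (kv.1 ∈ R.map PySem.Int.toStr) && m kv))) := by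
      funext kv
      by_cases h1 : kv.1 = PySem.Int.toStr q <;> by_cases h2 : kv.1 ∈ R.map PySem.Int.toStr <;>
        simp [h1, h2]
    refine ((congrArg (fun p => List.countP p L) hfun).trans ?_)
    rw [List.sum_cons, ← ih hnd']
    refine pv_countP_or L _ _ ?_
    intro kv _ hcontra
    rcases hcontra with ⟨hl, hr⟩
    simp only [Bool.and_eq_true, beq_iff_eq, decide_eq_true_eq] at hl hr
    exact hq (hl.1 ▸ hr.1)

-- counting items with a fixed key: key absent from the list
theorem pv_countP_key_absent (m : (String × String) → Bool) (L : List (String × String)) (s : String)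
    (h : s ∉ L.map Prod.fst) :
    L.countP (fun kv => (kv.1 == s) && m kv) = 0 := by
  rw [List.countP_eq_zero]
  intro kv hkv
  simp only [Bool.and_eq_true, beq_iff_eq, not_and]
  intro hk _
  exact h (List.mem_map.mpr ⟨kv, hkv, hk⟩)

-- counting items with a fixed key in a nodup-key list: key present
theorem pv_countP_key_present (m : (String × String) → Bool) (L : List (String × String)) (s v : String)
    (hnd : (L.map Prod.fst).Nodup) (hmem : (s, v) ∈ L) :
    L.countP (fun kv => (kv.1 == s) && m kv) = if m (s, v) then 1 else 0 := by
  induction L with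
  | nil => cases hmem
  | cons x L ih =>
    simp only [List.map_cons, List.nodup_cons] at hnd
    rw [List.countP_cons]
    rcases List.mem_cons.mp hmem with hx | hx
    · subst hx
      rw [pv_countP_key_absent m L s hnd.1]
      simp
    · have hs : s ∈ L.map Prod.fst := List.mem_map.mpr ⟨(s, v), hx, rfl⟩
      have hne : x.1 ≠ s := fun hh => hnd.1 (hh ▸ hs)
      rw [ih hnd.2 hx]
      simp [hne]

-- the table's items are exactly the generating list (its keys are distinct)
set_option maxRecDepth 8192 in
theorem pv_subjectOf_items :
    pvSubjectOf.items = (PySem.List.pyRange 1 101 1).map (fun q => (PySem.Int.toStr q, PySem.Int.floordiv (q - 1) 20)) := by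
  decide

-- the table's keys are distinct
set_option maxRecDepth 8192 in
theorem pv_subjectOf_nodup : pvSubjectOf.keys.Nodup := by decide

-- lookup in the table answers membership in the j-th block's key set (j = 0..4)
theorem pv_subjectOf_get? (k : String) (j : Int) (hj : 0 ≤ j) (hj5 : j < 5) :
    (pvSubjectOf.get? k == some j)
      = decide (k ∈ (PySem.List.pyRange (20 * j + 1) (20 * j + 21) 1).map PySem.Int.toStr) := by
  rw [Bool.eq_iff_iff]
  simp only [beq_iff_eq, decide_eq_true_eq]
  constructor
  · intro h
    have hmem := PySem.Dict.mem_items_of_get?_eq_some _ h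
    rw [pv_subjectOf_items] at hmem
    rcases List.mem_map.mp hmem with ⟨q, hqmem, hq⟩
    have h1 : PySem.Int.toStr q = k := congrArg Prod.fst hq
    have h2 : PySem.Int.floordiv (q - 1) 20 = j := congrArg Prod.snd hq
    rw [PySem.List.mem_pyRange_one] at hqmem
    rw [PySem.Int.floordiv_eq_iff_of_pos (by norm_num)] at h2
    exact List.mem_map.mpr ⟨q, by rw [PySem.List.mem_pyRange_one]; omega, h1⟩
  · intro h
    rcases List.mem_map.mp h with ⟨q, hqmem, hq⟩
    rw [PySem.List.mem_pyRange_one] at hqmem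
    have hmem : (k, j) ∈ pvSubjectOf.items := by
      rw [pv_subjectOf_items]
      refine List.mem_map.mpr ⟨q, by rw [PySem.List.mem_pyRange_one]; omega, ?_⟩
      have hfd : PySem.Int.floordiv (q - 1) 20 = j := by
        rw [PySem.Int.floordiv_eq_iff_of_pos (by norm_num)]; omega
      rw [hq, hfd]
    exact PySem.Dict.get?_of_mem_items _ hmem pv_subjectOf_nodup

-- one question's worth of B's count equals A's per-question indicator
theorem pv_count_one (da ca : List (String × String)) (q : Int) :
    (((PySem.Dict.ofList ca).items.countP (fun kv =>
        (kv.1 == PySem.Int.toStr q) && ((PySem.Dict.ofList da).get? kv.1 == some kv.2)) : Nat) : Int)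
      = pvInc da ca q := by
  have hndk : (PySem.Dict.ofList ca).keys.Nodup := PySem.Dict.nodup_keys_ofList ca
  have hnd : ((PySem.Dict.ofList ca).items.map Prod.fst).Nodup := by
    simpa [PySem.Dict.keys] using hndk
  rcases hC : (PySem.Dict.ofList ca).get? (PySem.Int.toStr q) with _ | v
  · have habs : PySem.Int.toStr q ∉ (PySem.Dict.ofList ca).items.map Prod.fst := by
      have := (PySem.Dict.get?_eq_none_iff_not_mem_keys (PySem.Dict.ofList ca) (PySem.Int.toStr q)).mp hC
      simpa [PySem.Dict.keys] using this
    rw [pv_countP_key_absent _ _ _ habs]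
    rcases hD : (PySem.Dict.ofList da).get? (PySem.Int.toStr q) with _ | w <;> simp [pvInc, hC, hD]
  · have hmem : (PySem.Int.toStr q, v) ∈ (PySem.Dict.ofList ca).items :=
      PySem.Dict.mem_items_of_get?_eq_some _ hC
    rw [pv_countP_key_present _ _ _ v hnd hmem]
    rcases hD : (PySem.Dict.ofList da).get? (PySem.Int.toStr q) with _ | w
    · simp [pvInc, hC, hD]
    · simp only [pvInc, hC, hD]
      split_ifs <;> simp_all

-- bucket j of B's scan equals A's per-block sum
set_option maxRecDepth 8192 in
theorem pv_bucket (da ca : List (String × String)) (j : Int) (hj : 0 ≤ j) (hj5 : j < 5) :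
    ((((PySem.Dict.ofList ca).items.countP (fun kv =>
        (pvSubjectOf.get? kv.1 == some j) && ((PySem.Dict.ofList da).get? kv.1 == some kv.2))) : Nat) : Int)
      = pvS da ca (20 * j + 1) (20 * j + 21) := by
  have hfun : (fun (kv : String × String) =>
      (pvSubjectOf.get? kv.1 == some j) && ((PySem.Dict.ofList da).get? kv.1 == some kv.2))
      = (fun kv => decide (kv.1 ∈ (PySem.List.pyRange (20 * j + 1) (20 * j + 21) 1).map PySem.Int.toStr)
          && ((PySem.Dict.ofList da).get? kv.1 == some kv.2)) := by
    funext kv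
    rw [pv_subjectOf_get? kv.1 j hj hj5]
  rw [hfun]
  have hndR : ((PySem.List.pyRange (20 * j + 1) (20 * j + 21) 1).map PySem.Int.toStr).Nodup := by
    interval_cases j <;> decide
  rw [pv_countP_split _ _ _ hndR, Nat.cast_list_sum, List.map_map]
  unfold pvS
  apply congrArg
  apply List.map_congr_left
  intro q _
  simpa using pv_count_one da ca q

-- B's scan: its effect on bucket j
theorem pv_foldl_getD (da : List (String × String)) (L : List (String × String))
    (d : PySem.Dict Int Int) (j : Int) :
    (L.foldl (pvStep (PySem.Dict.ofList da)) d).getD j 0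
    = d.getD j 0 + ((L.countP (fun kv =>
        (pvSubjectOf.get? kv.1 == some j) && ((PySem.Dict.ofList da).get? kv.1 == some kv.2)) : Nat) : Int) := by
  induction L generalizing d with
  | nil => simp only [List.foldl_nil, List.countP_nil, Nat.cast_zero, add_zero]
  | cons kv L ih =>
    simp only [List.foldl_cons, List.countP_cons, pvStep]
    rcases h : pvSubjectOf.get? kv.1 with _ | i
    · simp only [h]
      rw [ih]
      simp
    · simp only [h]
      by_cases hd : ((PySem.Dict.ofList da).get? kv.1 == some kv.2) = true
      · rw [if_pos hd, ih, PySem.Dict.getD_modify]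
        rcases eq_or_ne i j with hij | hij
        · subst hij
          simp [hd]
          ring
        · simp [hd, hij, Ne.symm hij]
      · rw [if_neg (by simp [Bool.not_eq_true] at hd; simp [hd])]
        rw [Bool.not_eq_true] at hd
        rw [ih]
        simp [hd]

-- B's scan never creates keys: every table value is already a bucket key
theorem pv_foldl_keys (da : List (String × String)) (L : List (String × String))
    (d : PySem.Dict Int Int) (h : ∀ p ∈ pvSubjectOf.items, d.contains p.2 = true) :
    (L.foldl (pvStep (PySem.Dict.ofList da)) d).keys = d.keys := by
  induction L generalizing d with
  | nil => simp only [List.foldl_nil]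
  | cons kv L ih =>
    simp only [List.foldl_cons, pvStep]
    rcases hg : pvSubjectOf.get? kv.1 with _ | i
    · simp only [hg]
      exact ih d h
    · simp only [hg]
      have hcont : d.contains i = true := h _ (PySem.Dict.mem_items_of_get?_eq_some _ hg)
      by_cases hd : ((PySem.Dict.ofList da).get? kv.1 == some kv.2) = true
      · rw [if_pos hd]
        have hkeys : (d.modify i 0 (· + 1)).keys = d.keys := by
          rw [PySem.Dict.keys_modify, PySem.Dict.keys_insert_of_contains _ _ hcont]
        rw [ih (d.modify i 0 (· + 1)) ?_, hkeys]
        intro p hp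
        rw [PySem.Dict.contains_modify]
        simp [h p hp]
      · rw [if_neg (by rw [Bool.not_eq_true] at hd; simp [hd])]
        exact ih d h

-- evaluation of A to the common shape
set_option maxRecDepth 8192 in
theorem pv_A_eval (da ca : List (String × String)) :
    calculate_subject_scores da ca
      = ((pvMk (pvS da ca 1 21) (pvS da ca 21 41) (pvS da ca 41 61) (pvS da ca 61 81) (pvS da ca 81 101)).items,
         pvS da ca 1 21 + pvS da ca 21 41 + pvS da ca 41 61 + pvS da ca 61 81 + pvS da ca 81 101) := by
  simp only [calculate_subject_scores]
  rw [show PySem.List.pyRange 1 6 1 = [1, 2, 3, 4, 5] from by decide]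
  simp only [List.foldl_cons, List.foldl_nil]
  simp only [pv_innerA]
  norm_num
  rfl

-- evaluation of B to the common shape
set_option maxRecDepth 8192 in
theorem pv_B_eval (da ca : List (String × String)) :
    calculate_subject_scores_alt da ca
      = ((pvMk (pvS da ca 1 21) (pvS da ca 21 41) (pvS da ca 41 61) (pvS da ca 61 81) (pvS da ca 81 101)).items,
         pvS da ca 1 21 + pvS da ca 21 41 + pvS da ca 41 61 + pvS da ca 61 81 + pvS da ca 81 101) := by
  simp only [calculate_subject_scores_alt]
  have hgetD : ∀ j : Int, 0 ≤ j → j < 5 →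
      (((PySem.Dict.ofList ca).items.foldl (pvStep (PySem.Dict.ofList da))
        (PySem.Dict.ofList ((PySem.List.pyRange 0 5 1).map (fun i => (i, (0 : Int)))))).getD j 0)
      = pvS da ca (20 * j + 1) (20 * j + 21) := by
    intro j h1 h2
    rw [pv_foldl_getD, pv_bucket da ca j h1 h2]
    have h0 : (PySem.Dict.ofList ((PySem.List.pyRange 0 5 1).map (fun i => (i, (0 : Int))))).getD j 0 = 0 := by
      interval_cases j <;> decide
    rw [h0, zero_add]
  have hkeys : ((PySem.Dict.ofList ca).items.foldl (pvStep (PySem.Dict.ofList da))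
      (PySem.Dict.ofList ((PySem.List.pyRange 0 5 1).map (fun i => (i, (0 : Int)))))).keys = [0, 1, 2, 3, 4] := by
    rw [pv_foldl_keys da _ _ (by decide)]
    decide
  have hvals : ((PySem.Dict.ofList ca).items.foldl (pvStep (PySem.Dict.ofList da))
      (PySem.Dict.ofList ((PySem.List.pyRange 0 5 1).map (fun i => (i, (0 : Int)))))).values.sum
      = pvS da ca 1 21 + pvS da ca 21 41 + pvS da ca 41 61 + pvS da ca 61 81 + pvS da ca 81 101 := by
    rw [PySem.Dict.values_eq_map_keys _ (by rw [hkeys]; decide) 0, hkeys]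
    simp only [List.map_cons, List.map_nil, List.sum_cons, List.sum_nil]
    rw [hgetD 0 (by norm_num) (by norm_num), hgetD 1 (by norm_num) (by norm_num),
        hgetD 2 (by norm_num) (by norm_num), hgetD 3 (by norm_num) (by norm_num),
        hgetD 4 (by norm_num) (by norm_num)]
    norm_num
    ring
  rw [show PySem.List.pyRange 0 5 1 = [0, 1, 2, 3, 4] from by decide] at hgetD hvals ⊢
  rw [hvals]
  simp only [List.foldl_cons, List.foldl_nil]
  rw [hgetD 0 (by norm_num) (by norm_num), hgetD 1 (by norm_num) (by norm_num),
      hgetD 2 (by norm_num) (by norm_num), hgetD 3 (by norm_num) (by norm_num),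
      hgetD 4 (by norm_num) (by norm_num)]
  norm_num
  rfl

-- ===== VERDICT (by name: the statement is the Claim_ definition above) =====
theorem calculate_subject_scores_spec : Claim_equal_calculate_subject_scores := by
  intro da ca _
  unfold Spec_calculate_subject_scores
  rw [pv_A_eval, pv_B_eval]
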